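-- pv_equiv track=rewrite | github.com/bayezid-hossain/leetcode | 1593-split-a-string-into-the-max-number-of-unique-substrings/1593-split-a-string-into-the-max-number-of-unique-substrings.py | maxUniqueSplit
-- ===== SOURCE A (Python) =====
-- def maxUniqueSplit(s: str) -> int:
--     substrings = set()
--     def backtrack( s, start, substrings):
--         if start == len(s):
--             return 0
--
--         max_count = 0
--
--         for end in range(start + 1, len(s) + 1):
--             sub_string = s[start:end]
--             if sub_string not in substrings:
--                 substrings.add(sub_string)
--                 max_count = max(max_count, 1 + backtrack(s, end, substrings))
--                 substrings.remove(sub_string)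
--
--         return max_count
--     return backtrack(s, 0, substrings)
-- ===== SOURCE B (Python) =====
-- def maxUniqueSplit(s: str) -> int:
--     def explore(rest, seen, count, best):
--         if count > best:
--             best = count
--         piece = ""
--         remaining = rest
--         while remaining:
--             piece += remaining[0]
--             remaining = remaining[1:]
--             if piece not in seen:
--                 best = explore(remaining, seen | {piece}, count + 1, best)
--         return best
--     return explore(s, frozenset(), 0, 0)
-- ===== Notes on version B (the rewrite author's own statement) =====
-- stated objective: alternative
-- what changed: Replaces A's return-the-max recursion over index ranges with set slicing by an accumulator-passing backtracker over string suffixes that builds each candidate piece incrementally character by character, threads a running best downward through a functional (union-built) seen set, and records the piece count at every node instead of maximising return values up the stack.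
import Mathlib
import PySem

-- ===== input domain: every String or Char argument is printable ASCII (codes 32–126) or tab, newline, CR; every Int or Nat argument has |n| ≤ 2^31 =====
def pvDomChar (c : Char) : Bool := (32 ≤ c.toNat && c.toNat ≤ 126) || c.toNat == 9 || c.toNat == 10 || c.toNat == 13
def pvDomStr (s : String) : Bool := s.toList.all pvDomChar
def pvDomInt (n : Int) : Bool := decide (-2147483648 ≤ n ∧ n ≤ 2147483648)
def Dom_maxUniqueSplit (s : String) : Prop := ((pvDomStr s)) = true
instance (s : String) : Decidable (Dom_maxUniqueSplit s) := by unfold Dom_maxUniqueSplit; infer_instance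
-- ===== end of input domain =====

-- B replaces A's return-the-max index/slice recursion by an accumulator-passing suffix
-- backtracker building pieces incrementally (objective: alternative; same exponential cost).

-- ===== PORT A =====
-- backtrack(s, start, substrings); the for-loop over end in range(start+1, len(s)+1)
-- is the recursion pyLoopA over end; the add/recurse/remove mutation is passing the
-- extended set to the recursive call only.
mutual
def pyBacktrackA (cs : List Char) (start : Nat) (seen : PySem.Set (List Char)) : Int :=
  if start = cs.length then 0
  else pyLoopA cs start (start + 1) (by omega) seen 0
termination_by (cs.length - start, cs.length + 2)
decreasing_by all_goals omega

def pyLoopA (cs : List Char) (start e : Nat) (hse : start < e) (seen : PySem.Set (List Char)) (maxCount : Int) : Int :=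
  if h : e ≤ cs.length then
    let sub := PySem.List.slice cs (some (start : Int)) (some (e : Int))
    let maxCount' := if sub ∈ seen then maxCount
                     else max maxCount (1 + pyBacktrackA cs e (PySem.Set.add seen sub))
    pyLoopA cs start (e + 1) (by omega) seen maxCount'
  else maxCount
termination_by (cs.length - start, cs.length + 1 - e)
decreasing_by all_goals omega
end

def maxUniqueSplit (s : String) : Int := pyBacktrackA s.toList 0 PySem.Set.empty

-- ===== PORT B =====
-- explore(rest, seen, count, best); the while-loop over remaining is pyLoopB,
-- carrying the incrementally built piece.
mutual
def pyExploreB (rest : List Char) (seen : PySem.Set (List Char)) (count best : Int) : Int :=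
  pyLoopB rest [] seen count (if count > best then count else best)
termination_by (rest.length, 1)

def pyLoopB (remaining piece : List Char) (seen : PySem.Set (List Char)) (count best : Int) : Int :=
  match remaining with
  | [] => best
  | c :: rs =>
    let p := piece ++ [c]
    let best' := if p ∈ seen then best
                 else pyExploreB rs (PySem.Set.add seen p) (count + 1) best
    pyLoopB rs p seen count best'
termination_by (remaining.length, 0)
end

def maxUniqueSplit_alt (s : String) : Int := pyExploreB s.toList PySem.Set.empty 0 0

-- ===== PRECONDITION & SPEC =====
def Spec_maxUniqueSplit (s : String) (out : Int) : Prop := out = maxUniqueSplit_alt s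
instance (s : String) (out : Int) : Decidable (Spec_maxUniqueSplit s out) := by unfold Spec_maxUniqueSplit; infer_instance

-- ===== CLAIM (what is proved, stated in full; the proofs are below) =====
def Claim_equal_maxUniqueSplit : Prop := ∀ (s : String), Dom_maxUniqueSplit s → Spec_maxUniqueSplit s (maxUniqueSplit s)

-- ===== LEMMAS AND PROOFS =====

-- Common characterisation: Gm remaining piece seen = the best additional number of pieces
-- obtainable by extending the partial piece `piece` with a prefix of `remaining`.
def Gm (remaining piece : List Char) (seen : PySem.Set (List Char)) : Int :=
  match remaining with
  | [] => 0
  | c :: rs =>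
    max (if (piece ++ [c]) ∈ seen then 0 else 1 + Gm rs [] (PySem.Set.add seen (piece ++ [c])))
        (Gm rs (piece ++ [c]) seen)

lemma Gm_nonneg (remaining piece : List Char) (seen : PySem.Set (List Char)) :
    0 ≤ Gm remaining piece seen := by
  induction remaining generalizing piece seen with
  | nil => simp [Gm]
  | cons c rs ih => simp only [Gm]; exact le_max_of_le_right (ih _ _)

lemma pyLoopB_spec : ∀ (n : Nat) (remaining : List Char), remaining.length ≤ n →
    ∀ (piece : List Char) (seen : PySem.Set (List Char)) (count best : Int), count ≤ best →
      pyLoopB remaining piece seen count best = max best (count + Gm remaining piece seen) := by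
  intro n
  induction n with
  | zero =>
    intro remaining h piece seen count best hcb
    have : remaining = [] := List.eq_nil_of_length_eq_zero (by omega)
    subst this; rw [pyLoopB]; simp only [Gm]; omega
  | succ n ih =>
    intro remaining h piece seen count best hcb
    match remaining with
    | [] => rw [pyLoopB]; simp only [Gm]; omega
    | c :: rs =>
      rw [pyLoopB]
      have hrs : rs.length ≤ n := by simp only [List.length_cons] at h; omega
      by_cases hp : (piece ++ [c]) ∈ seen
      · rw [if_pos hp, ih rs hrs _ _ _ _ hcb]
        have h1 := Gm_nonneg rs (piece ++ [c]) seen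
        simp only [Gm, if_pos hp]
        omega
      · rw [if_neg hp, pyExploreB,
          ih rs hrs _ _ _ _ (show (count + 1 : Int) ≤ _ by split <;> omega)]
        have h1 := Gm_nonneg rs [] (PySem.Set.add seen (piece ++ [c]))
        have h2 := Gm_nonneg rs (piece ++ [c]) seen
        rw [ih rs hrs _ _ _ _ (show (count : Int) ≤ _ by split <;> omega)]
        simp only [Gm, if_neg hp]
        split_ifs <;> omega

lemma pyExploreB_spec (rest : List Char) (seen : PySem.Set (List Char)) (count best : Int) :
    pyExploreB rest seen count best = max best (count + Gm rest [] seen) := by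
  rw [pyExploreB, pyLoopB_spec rest.length rest le_rfl _ _ _ _ (show (count : Int) ≤ _ by split <;> omega)]
  have h1 := Gm_nonneg rest [] seen
  split_ifs <;> omega

lemma pyLoopA_spec (cs : List Char) (n : Nat)
    (IH : ∀ start', cs.length - start' ≤ n → start' ≤ cs.length →
      ∀ seen, pyBacktrackA cs start' seen = Gm (cs.drop start') [] seen) :
    ∀ (m start e : Nat) (hse : start < e), cs.length + 1 - e = m → e ≤ cs.length + 1 →
      cs.length - start ≤ n + 1 →
      ∀ (seen : PySem.Set (List Char)) (acc : Int), 0 ≤ acc →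
      pyLoopA cs start e hse seen acc
        = max acc (Gm (cs.drop (e - 1)) ((cs.drop start).take (e - 1 - start)) seen) := by
  intro m
  induction m with
  | zero =>
    intro start e hse hm he hn seen acc hacc
    rw [pyLoopA, dif_neg (by omega)]
    have hd : cs.drop (e - 1) = [] := by
      rw [List.drop_eq_nil_iff]; omega
    rw [hd]; simp only [Gm]; omega
  | succ m ihm =>
    intro start e hse hm he hn seen acc hacc
    have hel : e ≤ cs.length := by omega
    have hj : e - 1 < cs.length := by omega
    rw [pyLoopA, dif_pos hel]
    -- the slice s[start:e] is the piece s[start:e-1] extended by the character s[e-1]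
    have hslice : PySem.List.slice cs (some (start : Int)) (some (e : Int))
        = (cs.drop start).take (e - 1 - start) ++ [cs[e - 1]] := by
      rw [PySem.List.slice_natCast]
      have hlen : e - 1 - start < (cs.drop start).length := by
        rw [List.length_drop]; omega
      have h1 : e - start = (e - 1 - start) + 1 := by omega
      rw [h1, List.take_add_one, List.getElem?_eq_getElem hlen]
      have h7 : start + (e - 1 - start) = e - 1 := by omega
      have h5 : (cs.drop start)[e - 1 - start]'hlen = cs[e - 1]'hj := by
        simp only [List.getElem_drop, h7]
      simp only [h5, Option.toList_some]
    have hdrop : cs.drop (e - 1) = cs[e - 1] :: cs.drop e := by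
      have h6 := List.drop_eq_getElem_cons hj
      have h8 : e - 1 + 1 = e := by omega
      rw [h8] at h6
      exact h6
    have h3 : (cs.drop start).take (e + 1 - 1 - start) = (cs.drop start).take (e - 1 - start) ++ [cs[e - 1]] := by
      rw [← hslice, PySem.List.slice_natCast]
      congr 1
    simp only [hslice]
    by_cases hp : (cs.drop start).take (e - 1 - start) ++ [cs[e - 1]] ∈ seen
    · rw [if_pos hp,
        ihm start (e + 1) (by omega) (by omega) (by omega) hn seen acc hacc]
      rw [hdrop, h3]
      simp only [Gm, if_pos hp, Nat.add_sub_cancel]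
      have h2 := Gm_nonneg (cs.drop e) ((cs.drop start).take (e - 1 - start) ++ [cs[e - 1]]) seen
      omega
    · rw [if_neg hp]
      rw [IH e (by omega) hel (PySem.Set.add seen ((cs.drop start).take (e - 1 - start) ++ [cs[e - 1]]))]
      rw [ihm start (e + 1) (by omega) (by omega) (by omega) hn seen _ (by omega)]
      rw [hdrop, h3]
      simp only [Gm, if_neg hp, Nat.add_sub_cancel]
      have h2 := Gm_nonneg (cs.drop e) ((cs.drop start).take (e - 1 - start) ++ [cs[e - 1]]) seen
      have h4 := Gm_nonneg (cs.drop e) []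
        (PySem.Set.add seen ((cs.drop start).take (e - 1 - start) ++ [cs[e - 1]]))
      omega

lemma pyBacktrackA_spec : ∀ (n : Nat) (cs : List Char) (start : Nat), cs.length - start ≤ n →
    start ≤ cs.length → ∀ (seen : PySem.Set (List Char)),
    pyBacktrackA cs start seen = Gm (cs.drop start) [] seen := by
  intro n
  induction n with
  | zero =>
    intro cs start h hle seen
    have hs : start = cs.length := by omega
    rw [pyBacktrackA, if_pos hs, hs, List.drop_length]
    simp [Gm]
  | succ n ihn =>
    intro cs start h hle seen
    by_cases hs : start = cs.length
    · rw [pyBacktrackA, if_pos hs, hs, List.drop_length]; simp [Gm]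
    · rw [pyBacktrackA, if_neg hs,
        pyLoopA_spec cs n (fun start' h1 h2 seen' => ihn cs start' h1 h2 seen')
          (cs.length + 1 - (start + 1)) start (start + 1) (by omega) rfl (by omega) (by omega)
          seen 0 le_rfl]
      simp only [Nat.add_sub_cancel, Nat.sub_self, List.take_zero]
      have := Gm_nonneg (cs.drop start) [] seen
      omega

theorem final_eq (s : String) : maxUniqueSplit s = maxUniqueSplit_alt s := by
  rw [maxUniqueSplit, maxUniqueSplit_alt, pyExploreB_spec,
    pyBacktrackA_spec s.toList.length s.toList 0 (by omega) (by omega)]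
  simp only [List.drop_zero]
  have := Gm_nonneg s.toList [] PySem.Set.empty
  omega

-- ===== VERDICT (by name: the statement is the Claim_ definition above) =====
theorem maxUniqueSplit_spec : Claim_equal_maxUniqueSplit := by
  intro s _
  unfold Spec_maxUniqueSplit
  exact final_eq s
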